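-- pv_equiv track=rewrite | github.com/AO228/Ohba_2025 | PosturalClustering.py | find_bouts
-- ===== SOURCE A (Python) =====
-- def find_bouts(mask, min_len):
--     bouts = []
--     start = None
--
--     for i, v in enumerate(mask):
--         if v and start is None:
--             start = i
--         elif not v and start is not None:
--             if i - start >= min_len:
--                 bouts.append((start, i))
--             start = None
--
--     if start is not None and len(mask) - start >= min_len:
--         bouts.append((start, len(mask)))
--
--     return bouts
-- ===== SOURCE B (Python) =====
-- def find_bouts(mask, min_len):
--     bouts = []
--     n = len(mask)
--     i = 0
--     while i < n:
--         if mask[i]: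
--             j = i + 1
--             while j < n and mask[j]:
--                 j += 1
--             if j - i >= min_len:
--                 bouts.append((i, j))
--             i = j
--         else:
--             i += 1
--     return bouts
-- ===== Notes on version B (the rewrite author's own statement) =====
-- stated objective: alternative
-- what changed: B replaces A's per-element start/None state machine (with a post-loop flush) by an index-based two-pointer scan that jumps over each maximal run of trues at once and emits its bounds immediately.
import Mathlib
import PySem

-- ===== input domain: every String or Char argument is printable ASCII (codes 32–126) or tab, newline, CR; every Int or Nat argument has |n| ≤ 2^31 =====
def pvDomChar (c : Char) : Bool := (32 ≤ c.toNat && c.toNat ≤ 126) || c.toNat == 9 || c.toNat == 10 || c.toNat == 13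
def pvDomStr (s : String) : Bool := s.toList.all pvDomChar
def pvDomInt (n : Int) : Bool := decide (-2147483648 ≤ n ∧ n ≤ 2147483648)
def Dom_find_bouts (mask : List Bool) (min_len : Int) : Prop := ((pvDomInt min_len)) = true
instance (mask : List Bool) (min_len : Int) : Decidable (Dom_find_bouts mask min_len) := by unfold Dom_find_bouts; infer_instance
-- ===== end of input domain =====

-- B scans each maximal run of trues with an inner two-pointer scan instead of A's per-element start/None state machine; objective: alternative decomposition, same cost.
-- ===== PORT A =====
def find_bouts (mask : List Bool) (min_len : Int) : List (Int × Int) :=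
  -- state machine over enumerate(mask): (bouts, start)
  let step := fun (s : List (Int × Int) × Option Int) (iv : Int × Bool) =>
    let (bouts, start) := s
    let (i, v) := iv
    if v && start.isNone then (bouts, some i)
    else if !v && start.isSome then
      match start with
      | some st => ((if min_len ≤ i - st then bouts ++ [(st, i)] else bouts), none)
      | none => (bouts, none)
    else (bouts, start)
  let r := (PySem.List.enumerate mask).foldl step ([], none)
  match r.2 with
  | some st => if min_len ≤ (mask.length : Int) - st then r.1 ++ [(st, (mask.length : Int))] else r.1
  | none => r.1


-- ===== PORT B =====
-- length of the leading run of `true`s (B's inner `while` scan)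
def scanTrue : List Bool → Nat
  | true :: t => scanTrue t + 1
  | _ => 0

theorem length_drop_scanTrue_lt (t : List Bool) : (t.drop (scanTrue t)).length < t.length + 1 := by
  have := List.length_drop (l := t) (i := scanTrue t)
  omega

-- B's outer `while` loop: jump over each maximal run of trues at once
def altGo (min_len : Int) : List Bool → Int → List (Int × Int)
  | [], _ => []
  | false :: t, i => altGo min_len t (i + 1)
  | true :: t, i =>
      let L : Nat := scanTrue t + 1
      let rest := altGo min_len (t.drop (L - 1)) (i + (L : Int))
      if min_len ≤ (L : Int) then (i, i + (L : Int)) :: rest else rest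
  termination_by t => t.length
  decreasing_by
    · simp
    · exact length_drop_scanTrue_lt t

def find_bouts_alt (mask : List Bool) (min_len : Int) : List (Int × Int) :=
  altGo min_len mask 0


-- ===== PRECONDITION & SPEC =====
def Spec_find_bouts (mask : List Bool) (min_len : Int) (out : List (Int × Int)) : Prop := out = find_bouts_alt mask min_len
instance (mask : List Bool) (min_len : Int) (out : List (Int × Int)) : Decidable (Spec_find_bouts mask min_len out) := by unfold Spec_find_bouts; infer_instance

-- ===== CLAIM (what is proved, stated in full; the proofs are below) =====
def Claim_equal_find_bouts : Prop := ∀ (mask : List Bool) (min_len : Int), Dom_find_bouts mask min_len → Spec_find_bouts mask min_len (find_bouts mask min_len)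

-- ===== LEMMAS AND PROOFS =====

-- A's fold step, named for the proofs
def stepA (min_len : Int) (s : List (Int × Int) × Option Int) (iv : Int × Bool) : List (Int × Int) × Option Int :=
  let (bouts, start) := s
  let (i, v) := iv
  if v && start.isNone then (bouts, some i)
  else if !v && start.isSome then
    match start with
    | some st => ((if min_len ≤ i - st then bouts ++ [(st, i)] else bouts), none)
    | none => (bouts, none)
  else (bouts, start)

-- A's final flush
def finA (min_len n : Int) (r : List (Int × Int) × Option Int) : List (Int × Int) :=
  match r.2 with
  | some st => if min_len ≤ n - st then r.1 ++ [(st, n)] else r.1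
  | none => r.1

theorem main_lemma (min_len : Int) : ∀ (t : List Bool) (i : Int) (acc : List (Int × Int)),
    (finA min_len (i + t.length) ((PySem.List.enumerate t i).foldl (stepA min_len) (acc, none))
        = acc ++ altGo min_len t i)
    ∧ ∀ st : Int,
      finA min_len (i + t.length) ((PySem.List.enumerate t i).foldl (stepA min_len) (acc, some st))
        = (if min_len ≤ (i + (scanTrue t : Int)) - st then acc ++ [(st, i + (scanTrue t : Int))] else acc)
            ++ altGo min_len (t.drop (scanTrue t)) (i + (scanTrue t : Int)) := by
  intro t
  induction t with
  | nil =>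
    intro i acc
    refine ⟨by simp [PySem.List.enumerate, finA, altGo], ?_⟩
    intro st
    simp [PySem.List.enumerate, finA, altGo, scanTrue]
  | cons v t ih =>
    intro i acc
    have hlen : ∀ s : List (Int × Int) × Option Int,
        finA min_len (i + ((v :: t).length : Int)) s = finA min_len ((i + 1) + (t.length : Int)) s := by
      intro s
      have : i + (((v :: t).length : Nat) : Int) = (i + 1) + (t.length : Int) := by
        simp [List.length_cons]; ring
      rw [this]
    cases v with
    | false =>
      constructor
      · have h := (ih (i + 1) acc).1
        rw [PySem.List.enumerate_cons, List.foldl_cons, hlen]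
        have hstep : stepA min_len (acc, none) (i, false) = (acc, none) := by
          simp [stepA]
        rw [hstep, h]
        simp [altGo]
      · intro st
        rw [PySem.List.enumerate_cons, List.foldl_cons, hlen]
        have hstep : stepA min_len (acc, some st) (i, false)
            = ((if min_len ≤ i - st then acc ++ [(st, i)] else acc), none) := by
          simp [stepA]
        rw [hstep, (ih (i + 1) _).1]
        simp [altGo, scanTrue]
    | true =>
      have hT : scanTrue (true :: t) = scanTrue t + 1 := rfl
      have hcast : (i + 1) + (scanTrue t : Int) = i + ((scanTrue t + 1 : Nat) : Int) := by
        push_cast; ring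
      constructor
      · have h := (ih (i + 1) acc).2 i
        rw [PySem.List.enumerate_cons, List.foldl_cons, hlen]
        have hstep : stepA min_len (acc, none) (i, true) = (acc, some i) := by
          simp [stepA]
        rw [hstep, h, hcast]
        have hcond : i + ((scanTrue t + 1 : Nat) : Int) - i = ((scanTrue t + 1 : Nat) : Int) := by ring
        rw [hcond]
        show _ = acc ++ altGo min_len (true :: t) i
        rw [altGo]
        split
        · simp
        · simp
      · intro st
        have h := (ih (i + 1) acc).2 st
        rw [PySem.List.enumerate_cons, List.foldl_cons, hlen]
        have hstep : stepA min_len (acc, some st) (i, true) = (acc, some st) := by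
          simp [stepA]
        rw [hstep, h, hcast, hT]
        simp [List.drop_succ_cons]



-- ===== VERDICT (by name: the statement is the Claim_ definition above) =====
theorem find_bouts_spec : Claim_equal_find_bouts := by
  intro mask min_len _
  unfold Spec_find_bouts
  have h : find_bouts mask min_len
      = finA min_len ((mask.length : Int)) ((PySem.List.enumerate mask 0).foldl (stepA min_len) ([], none)) := rfl
  have h2 := (main_lemma min_len mask 0 []).1
  rw [zero_add] at h2
  rw [h, h2]
  simp [find_bouts_alt]
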